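-- pv_equiv track=rewrite | github.com/praghav27/document_processing | llm_processing/content_mapper.py | _simple_relevance_check
-- ===== SOURCE A (Python) =====
-- def _simple_relevance_check(section_title: str, section_type: str, item_content: str, content_type: str) -> bool:
--     """Simple rule-based relevance checking"""
--
--     # Convert to lowercase for matching
--     title_lower = section_title.lower()
--     type_lower = section_type.lower()
--     content_lower = item_content.lower()
--
--     # Define keyword mappings
--     relevance_keywords = {
--         "electrical": ["electrical", "power", "transformer", "voltage", "circuit", "breaker", "wiring"],
--         "civil": ["civil", "concrete", "foundation", "structural", "grading", "drainage"],
--         "pricing": ["cost", "price", "$", "budget", "fee", "payment", "amount"],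
--         "technical": ["technical", "specification", "requirement", "standard", "design"],
--         "scope": ["scope", "work", "deliverable", "task", "service", "installation"],
--         "schedule": ["schedule", "timeline", "duration", "milestone", "phase", "completion"]
--     }
--
--     # Check if section keywords match item content
--     for category, keywords in relevance_keywords.items():
--         if any(keyword in title_lower or keyword in type_lower for keyword in keywords):
--             if any(keyword in content_lower for keyword in keywords):
--                 return True
--
--     return False
-- ===== SOURCE B (Python) =====
-- # Keyword-major single pass over an inverted keyword->category-bit index,
-- # accumulating two integer bitmasks, instead of a category-major nested loop.
--
-- _RELEVANCE_KEYWORDS = {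
--     "electrical": ["electrical", "power", "transformer", "voltage", "circuit", "breaker", "wiring"],
--     "civil": ["civil", "concrete", "foundation", "structural", "grading", "drainage"],
--     "pricing": ["cost", "price", "$", "budget", "fee", "payment", "amount"],
--     "technical": ["technical", "specification", "requirement", "standard", "design"],
--     "scope": ["scope", "work", "deliverable", "task", "service", "installation"],
--     "schedule": ["schedule", "timeline", "duration", "milestone", "phase", "completion"]
-- }
--
-- # inverted index: each keyword tagged with the bit of its category
-- _KEYWORD_BITS = [(kw, 1 << i)
--                  for i, kws in enumerate(_RELEVANCE_KEYWORDS.values())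
--                  for kw in kws]
--
--
-- def _simple_relevance_check(section_title: str, section_type: str, item_content: str, content_type: str) -> bool:
--     """Simple rule-based relevance checking via category bitmasks."""
--     title_lower = section_title.lower()
--     type_lower = section_type.lower()
--     content_lower = item_content.lower()
--
--     section_mask = 0
--     content_mask = 0
--     for kw, bit in _KEYWORD_BITS:
--         if kw in title_lower or kw in type_lower:
--             section_mask |= bit
--         if kw in content_lower:
--             content_mask |= bit
--     return section_mask & content_mask != 0
-- ===== Notes on version B (the rewrite author's own statement) =====
-- stated objective: alternative
-- what changed: Replaced the category-major nested any/early-return loop by a single keyword-major pass over an inverted keyword-to-category-bit index that accumulates two integer bitmasks (section hits, content hits) and tests their bitwise AND.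
import Mathlib
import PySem

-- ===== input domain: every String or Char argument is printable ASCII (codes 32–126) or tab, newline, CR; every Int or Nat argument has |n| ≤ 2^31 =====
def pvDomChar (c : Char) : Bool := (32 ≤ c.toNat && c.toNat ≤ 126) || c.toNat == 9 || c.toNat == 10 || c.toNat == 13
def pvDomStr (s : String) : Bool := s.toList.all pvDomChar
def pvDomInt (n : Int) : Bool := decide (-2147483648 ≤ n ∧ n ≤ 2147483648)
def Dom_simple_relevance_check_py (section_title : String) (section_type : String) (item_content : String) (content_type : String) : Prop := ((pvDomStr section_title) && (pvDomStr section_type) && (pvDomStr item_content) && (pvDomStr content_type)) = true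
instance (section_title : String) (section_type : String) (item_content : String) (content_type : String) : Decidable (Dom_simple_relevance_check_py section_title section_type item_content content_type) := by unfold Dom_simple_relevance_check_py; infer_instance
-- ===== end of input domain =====

-- B replaces A's category-major nested any/early-return loop by one keyword-major pass
-- over an inverted keyword→category-bit index accumulating two bitmasks (alternative, same cost).

-- ===== PORT A =====
-- the keyword dictionary (dict → association list)
def pvRelevanceKeywords : List (String × List String) :=
  [("electrical", ["electrical", "power", "transformer", "voltage", "circuit", "breaker", "wiring"]),
   ("civil", ["civil", "concrete", "foundation", "structural", "grading", "drainage"]),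
   ("pricing", ["cost", "price", "$", "budget", "fee", "payment", "amount"]),
   ("technical", ["technical", "specification", "requirement", "standard", "design"]),
   ("scope", ["scope", "work", "deliverable", "task", "service", "installation"]),
   ("schedule", ["schedule", "timeline", "duration", "milestone", "phase", "completion"])]

-- A's for-loop over the dict items with early 'return True'
def pvALoop (title_lower type_lower content_lower : String) :
    List (String × List String) → Bool
  | [] => false
  | (_, keywords) :: rest =>
    if keywords.any (fun keyword =>
        PySem.Str.isIn keyword title_lower || PySem.Str.isIn keyword type_lower) then
      if keywords.any (fun keyword => PySem.Str.isIn keyword content_lower) then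
        true
      else pvALoop title_lower type_lower content_lower rest
    else pvALoop title_lower type_lower content_lower rest

def simple_relevance_check_py (section_title : String) (section_type : String) (item_content : String) (content_type : String) : Bool :=
  let title_lower := PySem.Str.lower section_title
  let type_lower := PySem.Str.lower section_type
  let content_lower := PySem.Str.lower item_content
  pvALoop title_lower type_lower content_lower pvRelevanceKeywords

-- ===== PORT B =====
-- the inverted index: each keyword tagged with its category's bit (Python: 1 << i;
-- masks are nonnegative Python ints, ported as Nat)
-- enumerate indices are ≥ 0, so 1 << i is ported as 1 <<< i.toNat
def pvKeywordBits : List (String × Nat) :=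
  (PySem.List.enumerate (pvRelevanceKeywords.map Prod.snd)).flatMap
    (fun p => p.2.map (fun kw => (kw, 1 <<< p.1.toNat)))

def simple_relevance_check_py_alt (section_title : String) (section_type : String) (item_content : String) (content_type : String) : Bool :=
  let title_lower := PySem.Str.lower section_title
  let type_lower := PySem.Str.lower section_type
  let content_lower := PySem.Str.lower item_content
  let masks := pvKeywordBits.foldl (fun acc p =>
    (if PySem.Str.isIn p.1 title_lower || PySem.Str.isIn p.1 type_lower
       then acc.1 ||| p.2 else acc.1,
     if PySem.Str.isIn p.1 content_lower then acc.2 ||| p.2 else acc.2)) (0, 0)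
  masks.1 &&& masks.2 != 0

-- ===== PRECONDITION & SPEC =====
def Spec_simple_relevance_check_py (section_title : String) (section_type : String) (item_content : String) (content_type : String) (out : Bool) : Prop := out = simple_relevance_check_py_alt section_title section_type item_content content_type
instance (section_title : String) (section_type : String) (item_content : String) (content_type : String) (out : Bool) : Decidable (Spec_simple_relevance_check_py section_title section_type item_content content_type out) := by unfold Spec_simple_relevance_check_py; infer_instance

-- ===== CLAIM (what is proved, stated in full; the proofs are below) =====
def Claim_equal_simple_relevance_check_py : Prop := ∀ (section_title : String) (section_type : String) (item_content : String) (content_type : String), Dom_simple_relevance_check_py section_title section_type item_content content_type → Spec_simple_relevance_check_py section_title section_type item_content content_type (simple_relevance_check_py section_title section_type item_content content_type)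

-- ===== LEMMAS AND PROOFS =====

-- A's early-return loop equals List.any of the conjunction of the two per-category tests
lemma pvALoop_eq_any (tl ty cl : String) (table : List (String × List String)) :
    pvALoop tl ty cl table =
      table.any (fun p =>
        (p.2.any (fun k => PySem.Str.isIn k tl || PySem.Str.isIn k ty)) &&
        (p.2.any (fun k => PySem.Str.isIn k cl))) := by
  induction table with
  | nil => rfl
  | cons hd rest ih =>
    obtain ⟨c, kws⟩ := hd
    by_cases h1 : (kws.any fun keyword => PySem.Str.isIn keyword tl || PySem.Str.isIn keyword ty) = true
    · by_cases h2 : (kws.any fun keyword => PySem.Str.isIn keyword cl) = true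
      · simp only [pvALoop, List.any_cons, h1, h2, Bool.true_and, Bool.true_or]
        simp
      · rw [Bool.not_eq_true] at h2
        simp only [pvALoop, List.any_cons, if_pos h1, h2, Bool.and_false, Bool.false_or, ih]
        simp
    · rw [Bool.not_eq_true] at h1
      simp only [pvALoop, List.any_cons, h1, Bool.false_and, Bool.false_or, ih]
      simp

-- B's fold updates the two mask components independently, so it splits into two folds
lemma pv_split_gen (tl ty cl : String) (l : List (String × Nat)) (x y : Nat) :
    l.foldl (fun acc p =>
        (if PySem.Str.isIn p.1 tl || PySem.Str.isIn p.1 ty then acc.1 ||| p.2 else acc.1,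
         if PySem.Str.isIn p.1 cl then acc.2 ||| p.2 else acc.2)) (x, y)
      = (l.foldl
           (fun s p => if PySem.Str.isIn p.1 tl || PySem.Str.isIn p.1 ty then s ||| p.2 else s) x,
         l.foldl
           (fun s p => if PySem.Str.isIn p.1 cl then s ||| p.2 else s) y) := by
  induction l generalizing x y with
  | nil => rfl
  | cons h t ih => simp only [List.foldl]; exact ih _ _

lemma pv_split (tl ty cl : String) :
    pvKeywordBits.foldl (fun acc p =>
        (if PySem.Str.isIn p.1 tl || PySem.Str.isIn p.1 ty then acc.1 ||| p.2 else acc.1,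
         if PySem.Str.isIn p.1 cl then acc.2 ||| p.2 else acc.2)) (0, 0)
      = (pvKeywordBits.foldl
           (fun s p => if PySem.Str.isIn p.1 tl || PySem.Str.isIn p.1 ty then s ||| p.2 else s) 0,
         pvKeywordBits.foldl
           (fun s p => if PySem.Str.isIn p.1 cl then s ||| p.2 else s) 0) :=
  pv_split_gen tl ty cl pvKeywordBits 0 0

-- the mask fold over one category's block ORs in the bit iff some keyword matches
lemma pv_foldl_block (f : String → Bool) (b : Nat) (kws : List String) (s : Nat) :
    (kws.map (fun k => (k, b))).foldl
        (fun s p => if f p.1 then s ||| p.2 else s) s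
      = if kws.any f then s ||| b else s := by
  induction kws generalizing s with
  | nil => simp
  | cons k t ih =>
    by_cases h : f k
    · by_cases ht : t.any f <;> simp [h, ht, ih, Nat.or_assoc, Nat.or_self]
    · simp [h, ih]

-- the two specializations of pv_foldl_block used by the rewriting below
lemma pv_block_sec (tl ty : String) (b : Nat) (kws : List String) (s : Nat) :
    (kws.map (fun k => (k, b))).foldl
        (fun s p => if PySem.Str.isIn p.1 tl || PySem.Str.isIn p.1 ty then s ||| p.2 else s) s
      = if kws.any (fun k => PySem.Str.isIn k tl || PySem.Str.isIn k ty) then s ||| b else s :=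
  pv_foldl_block (fun k => PySem.Str.isIn k tl || PySem.Str.isIn k ty) b kws s

lemma pv_block_con (cl : String) (b : Nat) (kws : List String) (s : Nat) :
    (kws.map (fun k => (k, b))).foldl
        (fun s p => if PySem.Str.isIn p.1 cl then s ||| p.2 else s) s
      = if kws.any (fun k => PySem.Str.isIn k cl) then s ||| b else s :=
  pv_foldl_block (fun k => PySem.Str.isIn k cl) b kws s

-- the inverted index is the concatenation of the six per-category blocks
lemma pvKeywordBits_eq : pvKeywordBits =
    (["electrical", "power", "transformer", "voltage", "circuit", "breaker", "wiring"].map (fun k => (k, (1 : Nat)))) ++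
    (["civil", "concrete", "foundation", "structural", "grading", "drainage"].map (fun k => (k, (2 : Nat)))) ++
    (["cost", "price", "$", "budget", "fee", "payment", "amount"].map (fun k => (k, (4 : Nat)))) ++
    (["technical", "specification", "requirement", "standard", "design"].map (fun k => (k, (8 : Nat)))) ++
    (["scope", "work", "deliverable", "task", "service", "installation"].map (fun k => (k, (16 : Nat)))) ++
    (["schedule", "timeline", "duration", "milestone", "phase", "completion"].map (fun k => (k, (32 : Nat)))) := by
  decide

-- A's any over the literal table, with the inner per-category anys kept folded
lemma pv_table_any (f g : String → Bool) :
    pvRelevanceKeywords.any (fun p => (p.2.any f) && (p.2.any g)) =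
      ((["electrical", "power", "transformer", "voltage", "circuit", "breaker", "wiring"].any f && ["electrical", "power", "transformer", "voltage", "circuit", "breaker", "wiring"].any g) || ((["civil", "concrete", "foundation", "structural", "grading", "drainage"].any f && ["civil", "concrete", "foundation", "structural", "grading", "drainage"].any g) || ((["cost", "price", "$", "budget", "fee", "payment", "amount"].any f && ["cost", "price", "$", "budget", "fee", "payment", "amount"].any g) || ((["technical", "specification", "requirement", "standard", "design"].any f && ["technical", "specification", "requirement", "standard", "design"].any g) || ((["scope", "work", "deliverable", "task", "service", "installation"].any f && ["scope", "work", "deliverable", "task", "service", "installation"].any g) || ((["schedule", "timeline", "duration", "milestone", "phase", "completion"].any f && ["schedule", "timeline", "duration", "milestone", "phase", "completion"].any g) || false)))))) := by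
  rfl

-- ===== VERDICT =====
theorem simple_relevance_check_py_spec : Claim_equal_simple_relevance_check_py := by
  intro st sty ic ct _
  unfold Spec_simple_relevance_check_py
  dsimp only [simple_relevance_check_py, simple_relevance_check_py_alt]
  rw [pvALoop_eq_any, pv_split, pvKeywordBits_eq, pv_table_any]
  simp only [List.foldl_append, pv_block_sec, pv_block_con]
  generalize (["electrical", "power", "transformer", "voltage", "circuit", "breaker", "wiring"].any
      (fun k => PySem.Str.isIn k (PySem.Str.lower st) || PySem.Str.isIn k (PySem.Str.lower sty))) = a0
  generalize (["civil", "concrete", "foundation", "structural", "grading", "drainage"].any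
      (fun k => PySem.Str.isIn k (PySem.Str.lower st) || PySem.Str.isIn k (PySem.Str.lower sty))) = a1
  generalize (["cost", "price", "$", "budget", "fee", "payment", "amount"].any
      (fun k => PySem.Str.isIn k (PySem.Str.lower st) || PySem.Str.isIn k (PySem.Str.lower sty))) = a2
  generalize (["technical", "specification", "requirement", "standard", "design"].any
      (fun k => PySem.Str.isIn k (PySem.Str.lower st) || PySem.Str.isIn k (PySem.Str.lower sty))) = a3
  generalize (["scope", "work", "deliverable", "task", "service", "installation"].any
      (fun k => PySem.Str.isIn k (PySem.Str.lower st) || PySem.Str.isIn k (PySem.Str.lower sty))) = a4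
  generalize (["schedule", "timeline", "duration", "milestone", "phase", "completion"].any
      (fun k => PySem.Str.isIn k (PySem.Str.lower st) || PySem.Str.isIn k (PySem.Str.lower sty))) = a5
  generalize (["electrical", "power", "transformer", "voltage", "circuit", "breaker", "wiring"].any
      (fun k => PySem.Str.isIn k (PySem.Str.lower ic))) = b0
  generalize (["civil", "concrete", "foundation", "structural", "grading", "drainage"].any
      (fun k => PySem.Str.isIn k (PySem.Str.lower ic))) = b1
  generalize (["cost", "price", "$", "budget", "fee", "payment", "amount"].any
      (fun k => PySem.Str.isIn k (PySem.Str.lower ic))) = b2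
  generalize (["technical", "specification", "requirement", "standard", "design"].any
      (fun k => PySem.Str.isIn k (PySem.Str.lower ic))) = b3
  generalize (["scope", "work", "deliverable", "task", "service", "installation"].any
      (fun k => PySem.Str.isIn k (PySem.Str.lower ic))) = b4
  generalize (["schedule", "timeline", "duration", "milestone", "phase", "completion"].any
      (fun k => PySem.Str.isIn k (PySem.Str.lower ic))) = b5
  revert a0 a1 a2 a3 a4 a5 b0 b1 b2 b3 b4 b5
  decide
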